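-- pv_equiv track=rewrite | github.com/Pedro2um/Trabalho-TECC | QUESTAO 8.4/C.py | translate_delta
-- ===== SOURCE A (Python) =====
-- def translate_delta(mat, dx, dy):
--     """
--     Return matrix with elements translated by dx and dy, filling the would-be
--     empty spaces with 0. I feel this method may not be the most efficient.
--     """
--     rows, cols = len(mat), len(mat[0])
--
--     # Filter out simple deltas
--     if (dx == 0 and dy == 0):
--         return mat
--     elif (abs(dx) >= rows or abs(dy) >= cols):
--         return [[0 for col in mat[0]] for row in mat]
--
--     dmat = []
--
--     # Create new matrix translated by dx and dy
--     for r in range(rows):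
--         drow = []
--         for c in range(cols):
--             if (r + dy in range(rows) and c - dx in range(cols)):
--                 drow.append(mat[r + dy][c - dx])
--             else:
--                 drow.append(0)
--         dmat.append(drow)
--
--     return dmat
-- ===== SOURCE B (Python) =====
-- def translate_delta(mat, dx, dy):
--     rows, cols = len(mat), len(mat[0])
--     if dx == 0 and dy == 0:
--         return mat
--     if abs(dx) >= rows or abs(dy) >= cols:
--         return [[0] * cols for _ in range(rows)]
--     # clamped destination column overlap [c0, c1)
--     c0 = min(cols, max(0, dx))
--     c1 = max(c0, min(cols, cols + dx))
--     zero_row = [0] * cols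
--     out = []
--     for r in range(rows):
--         s = r + dy
--         if 0 <= s < rows:
--             out.append([0] * c0 + mat[s][c0 - dx:c1 - dx] + [0] * (cols - c1))
--         else:
--             out.append(zero_row)
--     return out
-- ===== Notes on version B (the rewrite author's own statement) =====
-- stated objective: alternative
-- what changed: Replaces A's per-cell `in range` membership tests over every (row, column) pair by computed overlap column ranges: B builds each output row as zero-padding plus one slice of the source row, and reuses a shared zero row for rows with no source.
import Mathlib
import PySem

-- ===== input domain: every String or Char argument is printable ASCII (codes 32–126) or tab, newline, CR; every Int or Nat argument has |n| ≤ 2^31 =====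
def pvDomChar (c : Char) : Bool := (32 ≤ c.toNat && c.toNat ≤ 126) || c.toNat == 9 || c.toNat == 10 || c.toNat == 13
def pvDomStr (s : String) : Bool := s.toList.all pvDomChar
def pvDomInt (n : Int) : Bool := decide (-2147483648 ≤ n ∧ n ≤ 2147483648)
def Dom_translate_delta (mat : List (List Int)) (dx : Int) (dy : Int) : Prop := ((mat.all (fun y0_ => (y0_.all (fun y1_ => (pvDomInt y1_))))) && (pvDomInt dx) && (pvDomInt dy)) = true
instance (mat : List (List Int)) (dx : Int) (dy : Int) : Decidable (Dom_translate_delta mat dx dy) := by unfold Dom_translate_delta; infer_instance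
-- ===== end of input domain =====

-- B replaces A's per-cell `in range` membership tests by computed overlap column ranges and per-row slices (objective: alternative).

-- ===== PORT A =====
def translate_delta (mat : List (List Int)) (dx : Int) (dy : Int) : List (List Int) :=
  let rows : Int := mat.length
  let cols : Int := (mat.getD 0 []).length
  if dx = 0 ∧ dy = 0 then mat
  else if |dx| ≥ rows ∨ |dy| ≥ cols then
    mat.map (fun _ => (mat.getD 0 []).map (fun _ => (0 : Int)))
  else
    (PySem.List.pyRange 0 rows 1).foldl (fun dmat r =>
      dmat ++ [(PySem.List.pyRange 0 cols 1).foldl (fun drow c =>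
        drow ++ [if (0 ≤ r + dy ∧ r + dy < rows) ∧ (0 ≤ c - dx ∧ c - dx < cols)
                 then PySem.List.pyGetD (PySem.List.pyGetD mat (r + dy) []) (c - dx) 0
                 else 0]) []]) []

-- ===== PORT B =====
def translate_delta_alt (mat : List (List Int)) (dx : Int) (dy : Int) : List (List Int) :=
  let rows : Int := mat.length
  let cols : Int := (mat.getD 0 []).length
  if dx = 0 ∧ dy = 0 then mat
  else if |dx| ≥ rows ∨ |dy| ≥ cols then
    List.replicate mat.length (List.replicate (mat.getD 0 []).length (0 : Int))
  else
    let c0 : Int := min cols (max 0 dx)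
    let c1 : Int := max c0 (min cols (cols + dx))
    let zeroRow : List Int := List.replicate (mat.getD 0 []).length (0 : Int)
    (PySem.List.pyRange 0 rows 1).foldl (fun out r =>
      let s := r + dy
      out ++ [if 0 ≤ s ∧ s < rows then
                List.replicate c0.toNat 0
                  ++ PySem.List.slice (PySem.List.pyGetD mat s []) (some (c0 - dx)) (some (c1 - dx))
                  ++ List.replicate (cols - c1).toNat 0
              else zeroRow]) []

-- ===== PRECONDITION & SPEC =====
-- Pre_ excludes exactly the inputs where Python A raises: the empty matrix (mat[0] is an
-- IndexError) and ragged matrices whose accessed rows are shorter than a column index the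
-- translating loop actually reads (mat[r+dy][c-dx] is an IndexError there).
def Pre_translate_delta (mat : List (List Int)) (dx : Int) (dy : Int) : Prop :=
  mat ≠ [] ∧
  ((dx = 0 ∧ dy = 0) ∨
   |dx| ≥ (mat.length : Int) ∨ |dy| ≥ ((mat.getD 0 []).length : Int) ∨
   (∀ s : Nat, s < mat.length → max 0 dy ≤ (s : Int) →
      (s : Int) < min (mat.length : Int) ((mat.length : Int) + dy) →
      -((mat.getD 0 []).length : Int) < dx →
      min ((mat.getD 0 []).length : Int) (((mat.getD 0 []).length : Int) - dx)
        ≤ ((mat.getD s []).length : Int)))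
instance (mat : List (List Int)) (dx : Int) (dy : Int) : Decidable (Pre_translate_delta mat dx dy) := by
  unfold Pre_translate_delta; infer_instance

def pvWitness_translate_delta : List (List Int) × Int × Int := ([[1, 2], [3, 4]], 1, 1)

def Spec_translate_delta (mat : List (List Int)) (dx : Int) (dy : Int) (out : List (List Int)) : Prop := out = translate_delta_alt mat dx dy
instance (mat : List (List Int)) (dx : Int) (dy : Int) (out : List (List Int)) : Decidable (Spec_translate_delta mat dx dy out) := by unfold Spec_translate_delta; infer_instance

-- ===== CLAIM (what is proved, stated in full; the proofs are below) =====
def Claim_equal_translate_delta : Prop := ∀ (mat : List (List Int)) (dx : Int) (dy : Int), Dom_translate_delta mat dx dy → Pre_translate_delta mat dx dy → Spec_translate_delta mat dx dy (translate_delta mat dx dy)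

-- ===== LEMMAS AND PROOFS =====

-- Per-row core: A's per-cell row (membership tests on each column) equals B's
-- replicate/slice/replicate row, given the row is long enough wherever it is read.
theorem pv_row_eq (row : List Int) (dx : Int) (n : Nat)
    (hL : -(n : Int) < dx → min (n : Int) ((n : Int) - dx) ≤ (row.length : Int)) :
    (List.range n).map (fun (k : Nat) =>
        if 0 ≤ (k : Int) - dx ∧ (k : Int) - dx < (n : Int)
        then PySem.List.pyGetD row ((k : Int) - dx) 0 else 0)
      = List.replicate (min (n : Int) (max 0 dx)).toNat 0
          ++ PySem.List.slice row (some (min (n : Int) (max 0 dx) - dx))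
              (some (max (min (n : Int) (max 0 dx)) (min (n : Int) ((n : Int) + dx)) - dx))
          ++ List.replicate ((n : Int) - max (min (n : Int) (max 0 dx)) (min (n : Int) ((n : Int) + dx))).toNat 0 := by
  by_cases h2 : (n : Int) ≤ dx
  · -- dx ≥ n : everything shifts out to the left; all zeros
    have hc0 : min (n : Int) (max 0 dx) = (n : Int) := by omega
    have hc1 : max (min (n : Int) (max 0 dx)) (min (n : Int) ((n : Int) + dx)) = (n : Int) := by omega
    rw [hc1, hc0]
    have hsl : PySem.List.slice row (some ((n : Int) - dx)) (some ((n : Int) - dx)) = [] := by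
      apply List.eq_nil_of_length_eq_zero
      rw [PySem.List.length_slice]; omega
    rw [hsl]
    simp only [List.append_nil, sub_self, Int.toNat_zero, List.replicate_zero, List.append_nil]
    have : ∀ k ∈ List.range n, (if 0 ≤ (k : Int) - dx ∧ (k : Int) - dx < (n : Int)
        then PySem.List.pyGetD row ((k : Int) - dx) 0 else 0) = (0 : Int) := by
      intro k hk
      rw [List.mem_range] at hk
      rw [if_neg (by omega)]
    rw [List.map_congr_left this, List.map_const', List.length_range]
    simp
  by_cases h1 : dx ≤ -(n : Int)
  · -- dx ≤ -n : all zeros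
    have hc0 : min (n : Int) (max 0 dx) = 0 := by omega
    have hc1 : max (min (n : Int) (max 0 dx)) (min (n : Int) ((n : Int) + dx)) = 0 := by omega
    rw [hc1, hc0]
    have hsl : PySem.List.slice row (some ((0:Int) - dx)) (some ((0:Int) - dx)) = [] := by
      apply List.eq_nil_of_length_eq_zero
      rw [PySem.List.length_slice]; omega
    rw [hsl]
    simp only [Int.toNat_zero, List.replicate_zero, List.nil_append, Int.sub_zero]
    have : ∀ k ∈ List.range n, (if 0 ≤ (k : Int) - dx ∧ (k : Int) - dx < (n : Int)
        then PySem.List.pyGetD row ((k : Int) - dx) 0 else 0) = (0 : Int) := by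
      intro k hk
      rw [List.mem_range] at hk
      rw [if_neg (by omega)]
    rw [List.map_congr_left this, List.map_const', List.length_range]
    simp
  · -- -n < dx < n : real overlap
    have hL' := hL (by omega)
    by_cases hnn : 0 ≤ dx
    · -- 0 ≤ dx < n
      have hc0 : min (n : Int) (max 0 dx) = dx := by omega
      have hc1 : max (min (n : Int) (max 0 dx)) (min (n : Int) ((n : Int) + dx)) = (n : Int) := by omega
      rw [hc1, hc0, sub_self]
      simp only [Int.toNat_zero, List.replicate_zero, List.append_nil, sub_self]
      rw [PySem.List.slice_toNat row (by omega) (by omega)]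
      have hLp : (n : Int) - dx ≤ (row.length : Int) := by omega
      apply List.ext_getElem
      · simp only [List.length_map, List.length_append, List.length_take, List.length_replicate,
          List.length_range, List.length_drop]
        omega
      · intro k hk hk2
        simp only [List.length_map, List.length_range] at hk
        simp only [List.length_append, List.length_take, List.length_replicate,
          List.length_drop] at hk2
        simp only [List.getElem_map, List.getElem_range]
        by_cases hkd : k < dx.toNat
        · rw [List.getElem_append_left (by simp only [List.length_replicate]; omega)]
          rw [List.getElem_replicate, if_neg (by omega)]
        · rw [List.getElem_append_right (by simp only [List.length_replicate]; omega)]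
          rw [if_pos (by omega)]
          rw [PySem.List.pyGetD_eq_getElem row 0 (by omega) (by omega)]
          simp only [List.getElem_take, List.getElem_drop, List.length_replicate]
          congr 1
          omega
    · -- -n < dx < 0
      have hc0 : min (n : Int) (max 0 dx) = 0 := by omega
      have hc1 : max (min (n : Int) (max 0 dx)) (min (n : Int) ((n : Int) + dx)) = (n : Int) + dx := by omega
      rw [hc1, hc0]
      simp only [Int.toNat_zero, List.replicate_zero, List.nil_append, Int.zero_sub,
        add_sub_cancel_right]
      rw [PySem.List.slice_toNat row (by omega) (by omega)]
      have hLn : (n : Int) ≤ (row.length : Int) := by omega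
      apply List.ext_getElem
      · simp only [List.length_map, List.length_append, List.length_take, List.length_replicate,
          List.length_range, List.length_drop]
        omega
      · intro k hk hk2
        simp only [List.length_map, List.length_range] at hk
        simp only [List.length_append, List.length_take, List.length_replicate,
          List.length_drop] at hk2
        simp only [List.getElem_map, List.getElem_range]
        by_cases hkd : k < n - (-dx).toNat
        · rw [List.getElem_append_left (by simp only [List.length_take, List.length_drop]; omega)]
          rw [if_pos (by omega)]
          rw [PySem.List.pyGetD_eq_getElem row 0 (by omega) (by omega)]
          simp only [List.getElem_take, List.getElem_drop]
          congr 1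
          omega
        · rw [List.getElem_append_right (by simp only [List.length_take, List.length_drop]; omega)]
          rw [List.getElem_replicate, if_neg (by omega)]

theorem pv_main (mat : List (List Int)) (dx : Int) (dy : Int)
    (hpre : Pre_translate_delta mat dx dy) :
    translate_delta mat dx dy = translate_delta_alt mat dx dy := by
  obtain ⟨hne, halt⟩ := hpre
  unfold translate_delta translate_delta_alt
  by_cases h0 : dx = 0 ∧ dy = 0
  · simp only [h0, and_self, if_true]
  rw [if_neg h0, if_neg h0]
  by_cases hg : |dx| ≥ (mat.length : Int) ∨ |dy| ≥ ((mat.getD 0 []).length : Int)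
  · rw [if_pos hg, if_pos hg]
    rw [List.map_const', List.map_const']
  rw [if_neg hg, if_neg hg]
  have hlen : ∀ s : Nat, s < mat.length → max 0 dy ≤ (s : Int) →
      (s : Int) < min (mat.length : Int) ((mat.length : Int) + dy) →
      -((mat.getD 0 []).length : Int) < dx →
      min ((mat.getD 0 []).length : Int) (((mat.getD 0 []).length : Int) - dx)
        ≤ ((mat.getD s []).length : Int) := by
    rcases halt with h | h | h | h
    · exact absurd h h0
    · exact absurd (Or.inl h) hg
    · exact absurd (Or.inr h) hg
    · exact h
  rw [PySem.List.pyRange_zero_natCast mat.length,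
    PySem.List.foldl_append_singleton_eq_map, PySem.List.foldl_append_singleton_eq_map]
  simp only [List.nil_append, List.map_map]
  apply List.map_congr_left
  intro r hr
  rw [List.mem_range] at hr
  simp only [Function.comp_apply]
  rw [PySem.List.pyRange_zero_natCast (mat.getD 0 []).length,
    PySem.List.foldl_append_singleton_eq_map]
  simp only [List.nil_append, List.map_map]
  by_cases hs : 0 ≤ (r : Int) + dy ∧ (r : Int) + dy < (mat.length : Int)
  · rw [if_pos hs]
    have hsnat : ((r : Int) + dy).toNat < mat.length := by omega
    have hrow : PySem.List.pyGetD mat ((r : Int) + dy) [] = mat.getD ((r : Int) + dy).toNat [] := by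
      rw [show (r : Int) + dy = ((((r : Int) + dy).toNat : Nat) : Int) by omega, PySem.List.pyGetD_natCast]
      simp
      rw [show (max ((r : Int) + dy) 0).toNat = ((r : Int) + dy).toNat from by omega]
    have hL := hlen ((r : Int) + dy).toNat hsnat (by omega) (by omega)
    have hstep : ∀ k ∈ List.range (mat.getD 0 []).length,
        ((fun c => if (0 ≤ (r : Int) + dy ∧ (r : Int) + dy < (mat.length : Int)) ∧
              (0 ≤ c - dx ∧ c - dx < ((mat.getD 0 []).length : Int))
            then PySem.List.pyGetD (PySem.List.pyGetD mat ((r : Int) + dy) []) (c - dx) 0 else 0)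
          ∘ (fun (k : Nat) => (k : Int))) k
        = (fun (k : Nat) =>
            if 0 ≤ (k : Int) - dx ∧ (k : Int) - dx < (((mat.getD 0 []).length : Nat) : Int)
            then PySem.List.pyGetD (mat.getD ((r : Int) + dy).toNat []) ((k : Int) - dx) 0 else 0) k := by
      intro k hk
      simp only [Function.comp_apply, hrow]
      by_cases hc : 0 ≤ (k : Int) - dx ∧ (k : Int) - dx < ((mat.getD 0 []).length : Int)
      · rw [if_pos ⟨hs, hc⟩, if_pos hc]
      · rw [if_neg (by tauto), if_neg hc]
    rw [List.map_congr_left hstep, pv_row_eq (mat.getD ((r : Int) + dy).toNat []) dx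
      (mat.getD 0 []).length (fun hd => hL hd), hrow]
  · rw [if_neg hs]
    have hstep : ∀ k ∈ List.range (mat.getD 0 []).length,
        ((fun c => if (0 ≤ (r : Int) + dy ∧ (r : Int) + dy < (mat.length : Int)) ∧
              (0 ≤ c - dx ∧ c - dx < ((mat.getD 0 []).length : Int))
            then PySem.List.pyGetD (PySem.List.pyGetD mat ((r : Int) + dy) []) (c - dx) 0 else 0)
          ∘ (fun (k : Nat) => (k : Int))) k = (0 : Int) := by
      intro k hk
      simp only [Function.comp_apply]
      rw [if_neg (by tauto)]
    rw [List.map_congr_left hstep, List.map_const', List.length_range]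

-- ===== VERDICT (by name: the statement is the Claim_ definition above) =====
theorem translate_delta_spec : Claim_equal_translate_delta := by
  intro mat dx dy _ hpre
  unfold Spec_translate_delta
  exact pv_main mat dx dy hpre
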